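-- pv_equiv track=rewrite | github.com/hanyeonhee/codespitz-python-algorithm-study | week03/magnus.py | max_honi_blocks
-- ===== SOURCE A (Python) =====
-- def max_honi_blocks(word):
--     honi = "HONI"
--     count = 0
--     honi_index = 0
--
--     for char in word:
--         if char == honi[honi_index]:
--             honi_index += 1
--             if honi_index == 4:
--                 count += 1
--                 honi_index = 0
--
--     return count
-- ===== SOURCE B (Python) =====
-- def max_honi_blocks(word):
--     def after(ch, s):
--         """Suffix of s after the first occurrence of ch, or None if absent."""
--         i = s.find(ch)
--         return None if i == -1 else s[i + 1:]
--
--     count = 0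
--     rest = word
--     while True:
--         for ch in "HONI":
--             rest = after(ch, rest)
--             if rest is None:
--                 return count
--         count += 1
-- ===== Notes on version B (the rewrite author's own statement) =====
-- stated objective: faster
-- what changed: Replaces A's char-by-char (count, honi_index) state machine with a forward-search decomposition: for each of the four needed letters in turn, jump to its next occurrence with str.find and continue after it, counting completed rounds.
import Mathlib
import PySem

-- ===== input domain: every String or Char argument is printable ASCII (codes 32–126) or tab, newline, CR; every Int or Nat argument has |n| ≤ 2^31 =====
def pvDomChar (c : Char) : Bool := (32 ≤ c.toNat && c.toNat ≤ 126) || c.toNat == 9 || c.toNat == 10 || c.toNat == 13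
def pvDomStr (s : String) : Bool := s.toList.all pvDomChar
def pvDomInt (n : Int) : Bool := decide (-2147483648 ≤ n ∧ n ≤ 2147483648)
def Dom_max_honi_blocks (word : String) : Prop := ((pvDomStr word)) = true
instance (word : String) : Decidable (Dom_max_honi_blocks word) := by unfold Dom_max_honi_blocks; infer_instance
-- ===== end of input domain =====

-- B re-implements the char-by-char HONI state machine as a find-the-next-letter scan
-- (idiomatic forward search); equivalence of the two is proved below.

-- ===== PORT A =====
-- literal port of A: one pass with (count, honi_index) state
def max_honi_blocks (word : String) : Int :=
  let honi := "HONI"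
  let r := word.toList.foldl (fun (st : Int × Nat) (char : Char) =>
      if char = honi.toList.getD st.2 ' ' then
        (if st.2 + 1 = 4 then (st.1 + 1, 0) else (st.1, st.2 + 1))
      else st) ((0 : Int), (0 : Nat))
  r.1

-- ===== PORT B =====
-- helper `after` of Source B: i = s.find(ch); None if i == -1 else s[i+1:]
def pvAfter (ch : Char) (s : List Char) : Option (List Char) :=
  let i := PySem.Chars.find s [ch]
  if i = -1 then none else some (PySem.List.slice s (some (i + 1)) none)

-- the `for ch in "HONI": rest = after(ch, rest); if rest is None: return count`
def pvSeekHONI : List Char → List Char → Option (List Char)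
  | [], rest => some rest
  | ch :: cs, rest =>
      match pvAfter ch rest with
      | none => none
      | some r => pvSeekHONI cs r

-- termination facts for the `while True` loop (each completed block consumes ≥ 1 char)
theorem pvAfter_some_length (c : Char) (s r : List Char) (h : pvAfter c s = some r) :
    r.length < s.length := by
  unfold pvAfter at h
  by_cases hi : PySem.Chars.find s [c] = -1
  · simp [hi] at h
  · simp only [hi, if_false] at h
    have hnn : 0 ≤ PySem.Chars.find s [c] := by
      have := PySem.Chars.neg_one_le_find s [c]; omega
    have hmem : c ∈ s := (List.singleton_infix_iff c s).mp
      ((PySem.Chars.find_nonneg_iff s [c]).mp hnn)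
    have hslen : 0 < s.length := List.length_pos_of_mem hmem
    have hcast : PySem.List.slice s (some (PySem.Chars.find s [c] + 1)) none
        = s.drop (PySem.Chars.find s [c] + 1).toNat :=
      PySem.List.slice_from s (by omega)
    rw [hcast] at h
    have hr : r = s.drop (PySem.Chars.find s [c] + 1).toNat := (Option.some.injEq _ _).mp h |>.symm
    subst hr
    simp only [List.length_drop]
    omega

theorem pvSeekHONI_le : ∀ (pat s r : List Char), pvSeekHONI pat s = some r → r.length ≤ s.length := by
  intro pat
  induction pat with
  | nil =>
    intro s r h
    simp [pvSeekHONI] at h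
    simp [h]
  | cons c cs ih =>
    intro s r h
    unfold pvSeekHONI at h
    cases hA : pvAfter c s with
    | none => rw [hA] at h; cases h
    | some m =>
      rw [hA] at h
      have h1 := pvAfter_some_length c s m hA
      have h2 := ih m r h
      omega

theorem pvSeekHONI_cons_lt (c : Char) (cs s r : List Char)
    (h : pvSeekHONI (c :: cs) s = some r) : r.length < s.length := by
  unfold pvSeekHONI at h
  cases hA : pvAfter c s with
  | none => rw [hA] at h; cases h
  | some m =>
    rw [hA] at h
    have h1 := pvAfter_some_length c s m hA
    have h2 := pvSeekHONI_le cs m r h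
    omega

-- the `while True:` loop of Source B
def pvLoop (rest : List Char) (count : Int) : Int :=
  match hE : pvSeekHONI "HONI".toList rest with
  | none => count
  | some r => pvLoop r (count + 1)
termination_by rest.length
decreasing_by
  exact pvSeekHONI_cons_lt 'H' ['O', 'N', 'I'] rest r hE

def max_honi_blocks_alt (word : String) : Int :=
  pvLoop word.toList 0

-- ===== PRECONDITION & SPEC =====
def Spec_max_honi_blocks (word : String) (out : Int) : Prop := out = max_honi_blocks_alt word
instance (word : String) (out : Int) : Decidable (Spec_max_honi_blocks word out) := by unfold Spec_max_honi_blocks; infer_instance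

-- ===== CLAIM (what is proved, stated in full; the proofs are below) =====
def Claim_equal_max_honi_blocks : Prop := ∀ (word : String), Dom_max_honi_blocks word → Spec_max_honi_blocks word (max_honi_blocks word)

-- ===== LEMMAS AND PROOFS =====

theorem prefix_singleton_iff (c : Char) (l : List Char) : [c] <+: l ↔ ∃ t, l = c :: t := by
  cases l with
  | nil => simp
  | cons a t =>
    constructor
    · intro h
      have := List.cons_prefix_cons.mp h
      exact ⟨t, by simp [this.1.symm]⟩
    · rintro ⟨t', ht⟩
      rw [ht]
      exact ⟨t', rfl⟩

theorem find_cons_single (x c : Char) (xs : List Char) :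
    PySem.Chars.find (x :: xs) [c] =
      if x = c then 0
      else if PySem.Chars.find xs [c] = -1 then -1 else PySem.Chars.find xs [c] + 1 := by
  by_cases hx : x = c
  · subst hx
    rw [if_pos rfl]
    have hinf : [x] <:+: (x :: xs) := (List.singleton_infix_iff x _).mpr (by simp)
    have hnn : 0 ≤ PySem.Chars.find (x :: xs) [x] :=
      (PySem.Chars.find_nonneg_iff _ _).mpr hinf
    obtain ⟨hpre, hmin⟩ := PySem.Chars.find_spec hnn
    by_contra hne
    have h0 : 0 < (PySem.Chars.find (x :: xs) [x]).toNat := by omega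
    exact (hmin 0 h0) ((prefix_singleton_iff x _).mpr ⟨xs, by simp⟩)
  · rw [if_neg hx]
    by_cases hm : c ∈ xs
    · have hf : 0 ≤ PySem.Chars.find xs [c] :=
        (PySem.Chars.find_nonneg_iff _ _).mpr ((List.singleton_infix_iff c _).mpr hm)
      have hfne : ¬ PySem.Chars.find xs [c] = -1 := by omega
      rw [if_neg hfne]
      have hg : 0 ≤ PySem.Chars.find (x :: xs) [c] :=
        (PySem.Chars.find_nonneg_iff _ _).mpr ((List.singleton_infix_iff c _).mpr (by simp [hm]))
      obtain ⟨gpre, gmin⟩ := PySem.Chars.find_spec hg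
      obtain ⟨fpre, fmin⟩ := PySem.Chars.find_spec hf
      set g := PySem.Chars.find (x :: xs) [c] with hgdef
      set f := PySem.Chars.find xs [c] with hfdef
      have hg0 : g.toNat ≠ 0 := by
        intro h0
        rw [h0, List.drop_zero] at gpre
        obtain ⟨t, ht⟩ := (prefix_singleton_iff c _).mp gpre
        injection ht with h1 _
        exact hx h1
      obtain ⟨h, hh⟩ : ∃ h, g.toNat = h + 1 := ⟨g.toNat - 1, by omega⟩
      have gpre' : [c] <+: xs.drop h := by
        rw [hh] at gpre; simpa [List.drop_succ_cons] using gpre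
      have hle1 : f.toNat ≤ h := by
        by_contra hlt
        exact (fmin h (by omega)) gpre'
      have hle2 : h ≤ f.toNat := by
        by_contra hlt
        exact (gmin (f.toNat + 1) (by omega)) (by simpa [List.drop_succ_cons] using fpre)
      omega
    · have hm' : c ∉ x :: xs := by
        simp only [List.mem_cons, not_or]
        exact ⟨fun h => hx h.symm, hm⟩
      have h1 : PySem.Chars.find (x :: xs) [c] = -1 :=
        (PySem.Chars.find_eq_neg_one_iff _ _).mpr (by rw [List.singleton_infix_iff]; exact hm')
      have h2 : PySem.Chars.find xs [c] = -1 :=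
        (PySem.Chars.find_eq_neg_one_iff _ _).mpr (by rw [List.singleton_infix_iff]; exact hm)
      simp [h1, h2]

theorem pvAfter_nil (c : Char) : pvAfter c [] = none := by
  unfold pvAfter
  have : PySem.Chars.find [] [c] = -1 :=
    (PySem.Chars.find_eq_neg_one_iff _ _).mpr (by rw [List.singleton_infix_iff]; simp)
  simp [this]

theorem pvAfter_cons (c x : Char) (xs : List Char) :
    pvAfter c (x :: xs) = if x = c then some xs else pvAfter c xs := by
  unfold pvAfter
  rw [find_cons_single x c xs]
  by_cases hx : x = c
  · simp only [hx]
    norm_num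
    exact PySem.List.slice_from _ (by omega) |>.trans (by simp)
  · simp only [hx, if_false]
    by_cases hf : PySem.Chars.find xs [c] = -1
    · simp [hf]
    · have hnn : 0 ≤ PySem.Chars.find xs [c] := by
        have := PySem.Chars.neg_one_le_find xs [c]; omega
      simp only [hf, if_false]
      have hne : ¬ (PySem.Chars.find xs [c] + 1 = -1) := by omega
      simp only [hne, if_false]
      congr 1
      rw [PySem.List.slice_from _ (by omega : (0:Int) ≤ PySem.Chars.find xs [c] + 1 + 1),
          PySem.List.slice_from _ (by omega : (0:Int) ≤ PySem.Chars.find xs [c] + 1)]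
      have h1 : (PySem.Chars.find xs [c] + 1 + 1).toNat = (PySem.Chars.find xs [c] + 1).toNat + 1 := by omega
      rw [h1, List.drop_succ_cons]

theorem pvSeekHONI_nil_right (c : Char) (cs : List Char) : pvSeekHONI (c :: cs) [] = none := by
  unfold pvSeekHONI
  rw [pvAfter_nil]

theorem pvSeekHONI_cons_cons (c x : Char) (cs xs : List Char) :
    pvSeekHONI (c :: cs) (x :: xs) =
      if x = c then pvSeekHONI cs xs else pvSeekHONI (c :: cs) xs := by
  by_cases hx : x = c
  · conv_lhs => unfold pvSeekHONI
    rw [pvAfter_cons, if_pos hx, if_pos hx]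
  · conv_lhs => unfold pvSeekHONI
    rw [pvAfter_cons, if_neg hx, if_neg hx]
    conv_rhs => unfold pvSeekHONI

-- recursive form of A's fold (proof helper)
def countA : List Char → Int → Nat → Int
  | [], cnt, _ => cnt
  | x :: xs, cnt, i =>
      if x = "HONI".toList.getD i ' ' then
        (if i + 1 = 4 then countA xs (cnt + 1) 0 else countA xs cnt (i + 1))
      else countA xs cnt i

theorem foldA_eq_countA : ∀ (xs : List Char) (cnt : Int) (i : Nat),
    (xs.foldl (fun (st : Int × Nat) (char : Char) =>
      if char = "HONI".toList.getD st.2 ' ' then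
        (if st.2 + 1 = 4 then (st.1 + 1, 0) else (st.1, st.2 + 1))
      else st) (cnt, i)).1 = countA xs cnt i := by
  intro xs
  induction xs with
  | nil => intro cnt i; simp [countA]
  | cons x xs ih =>
    intro cnt i
    simp only [List.foldl_cons]
    unfold countA
    split_ifs with hx h4
    · exact ih (cnt + 1) 0
    · exact ih cnt (i + 1)
    · exact ih cnt i

-- one round of Source B's loop, parameterised by the letters still to find
def loopFrom (pat xs : List Char) (cnt : Int) : Int :=
  match pvSeekHONI pat xs with
  | none => cnt
  | some r => pvLoop r (cnt + 1)

theorem pvLoop_eq_loopFrom (xs : List Char) (cnt : Int) :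
    pvLoop xs cnt = loopFrom "HONI".toList xs cnt := by
  rw [pvLoop, loopFrom]
  rcases h : pvSeekHONI "HONI".toList xs with _ | r <;> simp

theorem loopFrom_cons_cons (c x : Char) (cs xs : List Char) (cnt : Int) :
    loopFrom (c :: cs) (x :: xs) cnt =
      if x = c then loopFrom cs xs cnt else loopFrom (c :: cs) xs cnt := by
  by_cases hx : x = c <;> simp [loopFrom, pvSeekHONI_cons_cons, hx]

theorem loopFrom_nil_left (xs : List Char) (cnt : Int) :
    loopFrom [] xs cnt = pvLoop xs (cnt + 1) := rfl

theorem loopFrom_nil_right (c : Char) (cs : List Char) (cnt : Int) :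
    loopFrom (c :: cs) [] cnt = cnt := by
  simp [loopFrom, pvSeekHONI_nil_right]

theorem countA_eq_loopFrom : ∀ (xs : List Char) (cnt : Int) (i : Nat), i < 4 →
    countA xs cnt i = loopFrom (List.drop i "HONI".toList) xs cnt := by
  intro xs
  induction xs with
  | nil =>
    intro cnt i hi
    interval_cases i
    · rw [show List.drop 0 "HONI".toList = 'H' :: ['O','N','I'] from rfl, loopFrom_nil_right]; rfl
    · rw [show List.drop 1 "HONI".toList = 'O' :: ['N','I'] from rfl, loopFrom_nil_right]; rfl
    · rw [show List.drop 2 "HONI".toList = 'N' :: ['I'] from rfl, loopFrom_nil_right]; rfl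
    · rw [show List.drop 3 "HONI".toList = 'I' :: [] from rfl, loopFrom_nil_right]; rfl
  | cons x xs ih =>
    intro cnt i hi
    interval_cases i
    · rw [show List.drop 0 "HONI".toList = 'H' :: ['O','N','I'] from rfl, loopFrom_cons_cons]
      simp only [countA, show "HONI".toList.getD 0 ' ' = 'H' from rfl]
      by_cases hx : x = 'H'
      · simp only [hx, if_true]
        rw [ih cnt 1 (by omega)]; rfl
      · simp only [hx, if_false]
        rw [ih cnt 0 (by omega)]; rfl
    · rw [show List.drop 1 "HONI".toList = 'O' :: ['N','I'] from rfl, loopFrom_cons_cons]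
      simp only [countA, show "HONI".toList.getD 1 ' ' = 'O' from rfl]
      by_cases hx : x = 'O'
      · simp only [hx, if_true]
        rw [ih cnt 2 (by omega)]; rfl
      · simp only [hx, if_false]
        rw [ih cnt 1 (by omega)]; rfl
    · rw [show List.drop 2 "HONI".toList = 'N' :: ['I'] from rfl, loopFrom_cons_cons]
      simp only [countA, show "HONI".toList.getD 2 ' ' = 'N' from rfl]
      by_cases hx : x = 'N'
      · simp only [hx, if_true]
        rw [ih cnt 3 (by omega)]; rfl
      · simp only [hx, if_false]
        rw [ih cnt 2 (by omega)]; rfl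
    · rw [show List.drop 3 "HONI".toList = 'I' :: [] from rfl, loopFrom_cons_cons]
      simp only [countA, show "HONI".toList.getD 3 ' ' = 'I' from rfl]
      by_cases hx : x = 'I'
      · simp only [hx, if_true]
        rw [ih (cnt + 1) 0 (by omega), loopFrom_nil_left, pvLoop_eq_loopFrom]; rfl
      · simp only [hx, if_false]
        rw [ih cnt 3 (by omega)]; rfl

-- ===== VERDICT (by name: the statement is the Claim_ definition above) =====
theorem max_honi_blocks_spec : Claim_equal_max_honi_blocks := by
  intro word _
  unfold Spec_max_honi_blocks max_honi_blocks max_honi_blocks_alt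
  rw [foldA_eq_countA, countA_eq_loopFrom word.toList 0 0 (by omega), pvLoop_eq_loopFrom, List.drop_zero]
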